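-- pv_equiv track=rewrite | github.com/cellistigs/simclr | tf2/convert_utils.py | get_inv_block
-- ===== SOURCE A (Python) =====
-- def get_inv_block(ssl_nb):
--     """
--     :param ssl_nb: ind 1-52 of layers in the actual resnet blocks.
--     """
--     assert ssl_nb >= 1; "must be 1 indexed."
--     inv_block_mapping = {
--             13*3+3:4,
--             7*3+2:3,
--             3*3+1:2,
--             0:1,
--             } ## how many layers are included before this block? equal to number of units*3 + number of blocks (we add an additional shortcut "layer" for each block.)
--
--     for thresh,key in inv_block_mapping.items():
--         diff = ssl_nb-1 - thresh
--         if diff >=0: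
--             block_index = key
--             break
--         else:
--             pass
--     return block_index,diff
-- ===== SOURCE B (Python) =====
-- _THRESHOLDS = [0, 10, 23, 42]
-- _BLOCKS = [1, 2, 3, 4]
--
-- def get_inv_block(ssl_nb):
--     """Binary search over ascending thresholds instead of a linear scan over a dict."""
--     assert ssl_nb >= 1; "must be 1 indexed."
--     x = ssl_nb - 1
--     lo, hi = 0, len(_THRESHOLDS)
--     while lo < hi:  # bisect_right by hand (no imports in the source module)
--         mid = (lo + hi) // 2
--         if x < _THRESHOLDS[mid]:
--             hi = mid
--         else:
--             lo = mid + 1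
--     i = lo - 1
--     return _BLOCKS[i], x - _THRESHOLDS[i]
-- ===== Notes on version B (the rewrite author's own statement) =====
-- stated objective: idiomatic
-- what changed: Replaces the reverse-ordered dict linear scan (first threshold with non-negative diff) by a sorted ascending threshold table searched with a hand-written bisect_right binary search.
import Mathlib
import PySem

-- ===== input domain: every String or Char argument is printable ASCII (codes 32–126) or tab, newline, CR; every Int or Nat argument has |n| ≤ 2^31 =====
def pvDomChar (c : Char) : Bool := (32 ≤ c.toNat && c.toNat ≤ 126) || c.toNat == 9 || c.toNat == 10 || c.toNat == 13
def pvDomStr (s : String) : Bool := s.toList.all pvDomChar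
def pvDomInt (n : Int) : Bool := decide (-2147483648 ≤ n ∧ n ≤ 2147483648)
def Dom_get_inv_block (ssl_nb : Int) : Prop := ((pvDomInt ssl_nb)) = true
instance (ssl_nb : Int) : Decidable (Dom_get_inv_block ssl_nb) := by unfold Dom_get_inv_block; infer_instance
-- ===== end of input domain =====

-- B replaces A's linear scan over a descending-threshold dict by a binary search
-- over an ascending threshold table (idiomatic bisect_right); same (block, diff) pairs.


-- ===== PORT A =====
-- A's dict iterated in insertion order: [(42,4),(23,3),(10,2),(0,1)]; first thresh with
-- ssl_nb-1-thresh ≥ 0 breaks the loop. Under ssl_nb ≥ 1 the last entry always matches,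
-- so the Option default is unreachable (it stands for Python's unbound block_index).
def getInvLoop (x : Int) : List (Int × Int) → Option (Int × Int)
  | [] => none
  | (thresh, key) :: rest =>
      let diff := x - thresh
      if diff ≥ 0 then some (key, diff) else getInvLoop x rest

def get_inv_block (ssl_nb : Int) : Int × Int :=
  (getInvLoop (ssl_nb - 1) [(42, 4), (23, 3), (10, 2), (0, 1)]).getD (0, 0)

-- ===== PORT B =====
def bThresholds : List Int := [0, 10, 23, 42]
def bBlocks : List Int := [1, 2, 3, 4]

-- the hand-written bisect_right while-loop of Source B; the loop shrinks hi-lo by at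
-- least 1 per iteration, so fuel = hi-lo is a pure totality guard (same iterations)
def bisRF (x : Int) : Nat → Nat → Nat → Nat
  | 0, lo, _ => lo
  | fuel+1, lo, hi =>
    if lo < hi then
      let mid := (lo + hi) / 2
      if x < bThresholds.getD mid 0 then bisRF x fuel lo mid else bisRF x fuel (mid + 1) hi
    else lo

def bisR (x : Int) (lo hi : Nat) : Nat := bisRF x (hi - lo) lo hi

def get_inv_block_alt (ssl_nb : Int) : Int × Int :=
  let x := ssl_nb - 1
  let i := bisR x 0 bThresholds.length - 1
  (bBlocks.getD i 0, x - bThresholds.getD i 0)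

-- ===== PRECONDITION & SPEC =====
-- Pre_ excludes ssl_nb < 1, where both A and B raise AssertionError.
def Pre_get_inv_block (ssl_nb : Int) : Prop := 1 ≤ ssl_nb
instance (ssl_nb : Int) : Decidable (Pre_get_inv_block ssl_nb) := by unfold Pre_get_inv_block; infer_instance
def pvWitness_get_inv_block : Int := 27

def Spec_get_inv_block (ssl_nb : Int) (out : Int × Int) : Prop := out = get_inv_block_alt ssl_nb
instance (ssl_nb : Int) (out : Int × Int) : Decidable (Spec_get_inv_block ssl_nb out) := by unfold Spec_get_inv_block; infer_instance

-- ===== CLAIM (what is proved, stated in full; the proofs are below) =====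
def Claim_equal_get_inv_block : Prop := ∀ (ssl_nb : Int), Dom_get_inv_block ssl_nb → Pre_get_inv_block ssl_nb → Spec_get_inv_block ssl_nb (get_inv_block ssl_nb)

-- ===== LEMMAS AND PROOFS =====

theorem bisR_lt10 (x : Int) (h0 : 0 ≤ x) (h : x < 10) : bisR x 0 4 = 1 := by
  simp [bisR, bisRF, bThresholds, show ¬ x < 0 by omega, show x < 10 by omega,
    show x < 23 by omega]

theorem bisR_lt23 (x : Int) (h0 : 10 ≤ x) (h : x < 23) : bisR x 0 4 = 2 := by
  simp [bisR, bisRF, bThresholds, show ¬ x < 10 by omega, show x < 23 by omega]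

theorem bisR_lt42 (x : Int) (h0 : 23 ≤ x) (h : x < 42) : bisR x 0 4 = 3 := by
  simp [bisR, bisRF, bThresholds, show ¬ x < 23 by omega, show x < 42 by omega]

theorem bisR_ge42 (x : Int) (h : 42 ≤ x) : bisR x 0 4 = 4 := by
  simp [bisR, bisRF, bThresholds, show ¬ x < 23 by omega, show ¬ x < 42 by omega]

theorem get_inv_block_spec : Claim_equal_get_inv_block := by
  intro n _ hn
  have hx : 0 ≤ n - 1 := by exact Int.sub_nonneg.mpr hn
  have hlen : bThresholds.length = 4 := rfl
  simp only [Spec_get_inv_block, get_inv_block, get_inv_block_alt, hlen]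
  by_cases h10 : n - 1 < 10
  · rw [bisR_lt10 (n-1) hx h10]
    norm_num [getInvLoop, bThresholds, bBlocks]
    split_ifs <;> first | omega | simp_all
  · by_cases h23 : n - 1 < 23
    · rw [bisR_lt23 (n-1) (by omega) h23]
      norm_num [getInvLoop, bThresholds, bBlocks]
      split_ifs <;> first | omega | simp_all
    · by_cases h42 : n - 1 < 42
      · rw [bisR_lt42 (n-1) (by omega) h42]
        norm_num [getInvLoop, bThresholds, bBlocks]
        split_ifs <;> first | omega | simp_all
      · rw [bisR_ge42 (n-1) (by omega)]
        norm_num [getInvLoop, bThresholds, bBlocks]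
        split_ifs <;> first | omega | simp_all
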